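-- pv_equiv track=rewrite | github.com/whisperengine-ai/whisperengine-v2 | src/prompts/cdl_ai_integration.py | _select_template_by_preference
-- ===== SOURCE A (Python) =====
-- def _select_template_by_preference(templates: list, preference: str) -> str:
--     """Select template based on database-driven question preference"""
--     if not templates:
--         return ""
--
--     # Map preferences to template selection logic
--     preference_lower = preference.lower()
--
--     if preference_lower == 'origin' or preference_lower == 'experience':
--         # Prefer "How did you" templates for origin/experience questions
--         for template in templates:
--             if 'How did you' in template or 'What got you' in template:
--                 return template
--
--     elif preference_lower == 'specifics':
--         # Prefer "What aspects" or "What's your favorite" for specifics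
--         for template in templates:
--             if 'What aspects' in template or 'favorite' in template or 'type of' in template:
--                 return template
--
--     elif preference_lower == 'location':
--         # Prefer "Where do you" templates for location questions
--         for template in templates:
--             if 'Where do you' in template or 'place for' in template:
--                 return template
--
--     elif preference_lower == 'community':
--         # Prefer community/social templates
--         for template in templates:
--             if 'others' in template or 'people' in template or 'share' in template:
--                 return template
--
--     # Fallback to first template
--     return templates[0]
-- ===== SOURCE B (Python) =====
-- # Keyword-major: compute each keyword's first matching index, take the minimum.
-- def _first_index(templates, kw):
--     for i, t in enumerate(templates):
--         if kw in t:
--             return i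
--     return len(templates)
--
--
-- def _select_template_by_preference(templates: list, preference: str) -> str:
--     if not templates:
--         return ""
--     p = preference.lower()
--     if p in ('origin', 'experience'):
--         kws = ('How did you', 'What got you')
--     elif p == 'specifics':
--         kws = ('What aspects', 'favorite', 'type of')
--     elif p == 'location':
--         kws = ('Where do you', 'place for')
--     elif p == 'community':
--         kws = ('others', 'people', 'share')
--     else:
--         kws = ()
--     best = min((_first_index(templates, kw) for kw in kws), default=len(templates))
--     return templates[best] if best < len(templates) else templates[0]
-- ===== Notes on version B (the rewrite author's own statement) =====
-- stated objective: alternative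
-- what changed: Keyword-major instead of template-major: B computes each keyword's first matching index in a separate pass and returns the template at the minimum index (default len -> fallback), instead of A's four duplicated branch-loops scanning templates for the first one containing any keyword.
import Mathlib
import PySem

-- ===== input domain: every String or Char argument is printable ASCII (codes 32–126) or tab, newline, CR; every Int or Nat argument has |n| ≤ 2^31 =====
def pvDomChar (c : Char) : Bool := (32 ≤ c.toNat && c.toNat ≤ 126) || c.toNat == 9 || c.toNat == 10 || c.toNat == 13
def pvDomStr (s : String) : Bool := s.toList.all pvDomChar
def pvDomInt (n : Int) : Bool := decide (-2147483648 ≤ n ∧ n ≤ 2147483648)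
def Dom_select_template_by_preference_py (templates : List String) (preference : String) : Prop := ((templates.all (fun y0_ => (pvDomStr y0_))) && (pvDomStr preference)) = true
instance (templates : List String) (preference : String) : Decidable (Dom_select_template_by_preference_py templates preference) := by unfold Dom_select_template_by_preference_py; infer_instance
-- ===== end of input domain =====

-- B is keyword-major: one pass per keyword computing its first matching index, then the
-- minimum index wins — instead of A's template-major first-match branch loops (alternative).

-- ===== PORT A =====
-- each of A's four 'for template in templates' loops, transliterated
def loopOrigin : List String → Option String
  | [] => none
  | t :: r =>
    if PySem.Str.isIn "How did you" t || PySem.Str.isIn "What got you" t then some t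
    else loopOrigin r

def loopSpecifics : List String → Option String
  | [] => none
  | t :: r =>
    if PySem.Str.isIn "What aspects" t || PySem.Str.isIn "favorite" t || PySem.Str.isIn "type of" t then some t
    else loopSpecifics r

def loopLocation : List String → Option String
  | [] => none
  | t :: r =>
    if PySem.Str.isIn "Where do you" t || PySem.Str.isIn "place for" t then some t
    else loopLocation r

def loopCommunity : List String → Option String
  | [] => none
  | t :: r =>
    if PySem.Str.isIn "others" t || PySem.Str.isIn "people" t || PySem.Str.isIn "share" t then some t
    else loopCommunity r

def select_template_by_preference_py (templates : List String) (preference : String) : String :=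
  match templates with
  | [] => ""
  | t0 :: _ =>
    let pl := PySem.Str.lower preference
    if pl == "origin" || pl == "experience" then
      match loopOrigin templates with
      | some t => t
      | none => t0
    else if pl == "specifics" then
      match loopSpecifics templates with
      | some t => t
      | none => t0
    else if pl == "location" then
      match loopLocation templates with
      | some t => t
      | none => t0
    else if pl == "community" then
      match loopCommunity templates with
      | some t => t
      | none => t0
    else t0

-- ===== PORT B =====
-- Source B's _first_index: index of the first template containing kw, or len(templates) if none
-- (the recursion returns exactly len(templates) when no element matches).
def firstIndex (templates : List String) (kw : String) : Nat :=
  match templates with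
  | [] => 0
  | t :: r => if PySem.Str.isIn kw t then 0 else 1 + firstIndex r kw

def select_template_by_preference_py_alt (templates : List String) (preference : String) : String :=
  match templates with
  | [] => ""
  | t0 :: _ =>
    let p := PySem.Str.lower preference
    let kws : List String :=
      if p == "origin" || p == "experience" then ["How did you", "What got you"]
      else if p == "specifics" then ["What aspects", "favorite", "type of"]
      else if p == "location" then ["Where do you", "place for"]
      else if p == "community" then ["others", "people", "share"]
      else []
    -- min(…, default=len(templates))
    let best := ((kws.map (firstIndex templates)).min?).getD templates.length
    if best < templates.length then templates.getD best "" else t0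

-- ===== PRECONDITION & SPEC =====
def Spec_select_template_by_preference_py (templates : List String) (preference : String) (out : String) : Prop := out = select_template_by_preference_py_alt templates preference
instance (templates : List String) (preference : String) (out : String) : Decidable (Spec_select_template_by_preference_py templates preference out) := by unfold Spec_select_template_by_preference_py; infer_instance

-- ===== CLAIM =====
def Claim_equal_select_template_by_preference_py : Prop := ∀ (templates : List String) (preference : String), Dom_select_template_by_preference_py templates preference → Spec_select_template_by_preference_py templates preference (select_template_by_preference_py templates preference)

-- ===== LEMMAS AND PROOFS =====
-- generic first-match index with sentinel = length
def fidx (p : String → Bool) : List String → Nat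
  | [] => 0
  | t :: r => if p t then 0 else 1 + fidx p r

theorem firstIndex_eq (ts : List String) (kw : String) :
    firstIndex ts kw = fidx (fun t => PySem.Str.isIn kw t) ts := by
  induction ts with
  | nil => rfl
  | cons t r ih => rw [firstIndex, fidx]; rw [ih]

theorem fidx_le (p : String → Bool) (ts : List String) : fidx p ts ≤ ts.length := by
  induction ts with
  | nil => simp [fidx]
  | cons t r ih => rw [fidx]; split <;> simp <;> omega

theorem fidx_or (p q : String → Bool) (ts : List String) :
    fidx (fun t => p t || q t) ts = min (fidx p ts) (fidx q ts) := by
  induction ts with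
  | nil => rfl
  | cons t r ih =>
    simp only [fidx, ih]
    by_cases hp : p t <;> by_cases hq : q t <;> simp [hp, hq] <;> omega

theorem matchFind (p : String → Bool) (ts : List String) (t0 : String) :
    (match ts.find? p with | some t => t | none => t0) =
      if fidx p ts < ts.length then ts.getD (fidx p ts) "" else t0 := by
  induction ts with
  | nil => rfl
  | cons t r ih =>
    rw [List.find?_cons, fidx]
    by_cases hp : p t
    · simp [hp]
    · have hle := fidx_le p r
      simp only [hp, Bool.false_eq_true, if_false, ih, List.length_cons]
      by_cases h : fidx p r < r.length
      · rw [if_pos h, if_pos (by omega), Nat.add_comm, List.getD_cons_succ]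
      · rw [if_neg h, if_neg (by omega)]

theorem loopOrigin_eq (ts : List String) :
    loopOrigin ts = ts.find? (fun t => PySem.Str.isIn "How did you" t || PySem.Str.isIn "What got you" t) := by
  induction ts with
  | nil => rfl
  | cons t r ih => rw [loopOrigin, List.find?_cons]; cases h : (PySem.Str.isIn "How did you" t || PySem.Str.isIn "What got you" t) <;> simp [h, ih]

theorem loopSpecifics_eq (ts : List String) :
    loopSpecifics ts = ts.find? (fun t => PySem.Str.isIn "What aspects" t || PySem.Str.isIn "favorite" t || PySem.Str.isIn "type of" t) := by
  induction ts with
  | nil => rfl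
  | cons t r ih => rw [loopSpecifics, List.find?_cons]; cases h : (PySem.Str.isIn "What aspects" t || PySem.Str.isIn "favorite" t || PySem.Str.isIn "type of" t) <;> simp [h, ih]

theorem loopLocation_eq (ts : List String) :
    loopLocation ts = ts.find? (fun t => PySem.Str.isIn "Where do you" t || PySem.Str.isIn "place for" t) := by
  induction ts with
  | nil => rfl
  | cons t r ih => rw [loopLocation, List.find?_cons]; cases h : (PySem.Str.isIn "Where do you" t || PySem.Str.isIn "place for" t) <;> simp [h, ih]

theorem loopCommunity_eq (ts : List String) :
    loopCommunity ts = ts.find? (fun t => PySem.Str.isIn "others" t || PySem.Str.isIn "people" t || PySem.Str.isIn "share" t) := by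
  induction ts with
  | nil => rfl
  | cons t r ih => rw [loopCommunity, List.find?_cons]; cases h : (PySem.Str.isIn "others" t || PySem.Str.isIn "people" t || PySem.Str.isIn "share" t) <;> simp [h, ih]

-- A two-keyword branch agrees with B's min-index computation
theorem branch2 (ts : List String) (t0 k1 k2 : String) :
    (match ts.find? (fun t => PySem.Str.isIn k1 t || PySem.Str.isIn k2 t) with | some t => t | none => t0) =
      (let best := (([k1, k2].map (firstIndex ts)).min?).getD ts.length
       if best < ts.length then ts.getD best "" else t0) := by
  simp only [List.map, List.min?, List.foldl, Option.getD, firstIndex_eq]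
  rw [matchFind, fidx_or]

theorem branch3 (ts : List String) (t0 k1 k2 k3 : String) :
    (match ts.find? (fun t => PySem.Str.isIn k1 t || PySem.Str.isIn k2 t || PySem.Str.isIn k3 t) with | some t => t | none => t0) =
      (let best := (([k1, k2, k3].map (firstIndex ts)).min?).getD ts.length
       if best < ts.length then ts.getD best "" else t0) := by
  simp only [List.map, List.min?, List.foldl, Option.getD, firstIndex_eq]
  rw [matchFind, fidx_or, fidx_or, Nat.min_assoc]

-- ===== VERDICT =====
theorem select_template_by_preference_py_spec : Claim_equal_select_template_by_preference_py := by
  intro templates preference _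
  unfold Spec_select_template_by_preference_py
  unfold select_template_by_preference_py select_template_by_preference_py_alt
  cases templates with
  | nil => rfl
  | cons t0 rest =>
    simp only []
    generalize PySem.Str.lower preference = pl
    by_cases h1 : (pl == "origin" || pl == "experience") = true
    · simp only [h1, if_true, loopOrigin_eq]; exact branch2 _ _ _ _
    by_cases h2 : pl == "specifics"
    · simp only [h1, h2, if_false, if_true, loopSpecifics_eq]; exact branch3 _ _ _ _ _
    by_cases h3 : pl == "location"
    · simp only [h1, h2, h3, if_false, if_true, loopLocation_eq]; exact branch2 _ _ _ _
    by_cases h4 : pl == "community"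
    · simp only [h1, h2, h3, h4, if_false, if_true, loopCommunity_eq]; exact branch3 _ _ _ _ _
    · simp only [h1, h2, h3, h4, if_false, Bool.not_eq_true] at *
      simp [h1, h2, h3, h4]
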